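-- pv_equiv track=rewrite | github.com/milanhorvatovic/skill-system-foundry | skill-system-foundry/scripts/lib/bundling.py | _split_query_and_fragment
-- ===== SOURCE A (Python) =====
-- def _split_query_and_fragment(path: str) -> tuple[str, str]:
--     """Split *path* into base path and optional query/fragment suffix."""
--     query_index = path.find("?")
--     fragment_index = path.find("#")
--     indexes = [idx for idx in (query_index, fragment_index) if idx >= 0]
--     if not indexes:
--         return path, ""
--
--     split_index = min(indexes)
--     return path[:split_index], path[split_index:]
-- ===== SOURCE B (Python) =====
-- def _split_query_and_fragment(path: str) -> tuple[str, str]: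
--     """Split *path* into base path and optional query/fragment suffix."""
--     for i, c in enumerate(path):
--         if c in "?#":
--             return path[:i], path[i:]
--     return path, ""
-- ===== Notes on version B (the rewrite author's own statement) =====
-- stated objective: simpler
-- what changed: Replaces the two independent find() scans combined by a min over a filtered index list with a single left-to-right scan that returns at the first query/fragment marker character.
import Mathlib
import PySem

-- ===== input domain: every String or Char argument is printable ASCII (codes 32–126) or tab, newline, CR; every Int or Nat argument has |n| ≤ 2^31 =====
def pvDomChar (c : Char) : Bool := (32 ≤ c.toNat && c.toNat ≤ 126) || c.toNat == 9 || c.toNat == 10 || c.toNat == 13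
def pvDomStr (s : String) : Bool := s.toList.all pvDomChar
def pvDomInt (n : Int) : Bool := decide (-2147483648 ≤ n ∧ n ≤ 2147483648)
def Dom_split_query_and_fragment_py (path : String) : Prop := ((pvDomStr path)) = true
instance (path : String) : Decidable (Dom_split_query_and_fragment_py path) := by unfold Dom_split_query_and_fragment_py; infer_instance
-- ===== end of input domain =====

-- B replaces A's two find() scans + min over a filtered index list by one
-- left-to-right scan returning at the first '?' or '#' (objective: simpler).


-- ===== PORT A =====
def split_query_and_fragment_py (path : String) : String × String :=
  let query_index := PySem.Str.find path "?"
  let fragment_index := PySem.Str.find path "#"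
  let indexes := [query_index, fragment_index].filter (fun idx => decide (0 ≤ idx))
  if indexes = [] then (path, "")
  else
    -- min(indexes): indexes is nonempty here, so min? is `some`; getD 0 is never used
    let split_index := (PySem.List.min? indexes (fun x => x)).getD 0
    (PySem.Str.slice path none (some split_index), PySem.Str.slice path (some split_index) none)

-- ===== PORT B =====
-- `for i, c in enumerate(path): if c in "?#": …`; for a single char c, `c in "?#"`
-- is exactly membership in the two characters (exact on all inputs).
def pvAltGo (path : String) (rest : List Char) (i : Nat) : String × String :=
  match rest with
  | [] => (path, "")
  | c :: rs =>
    if c = '?' ∨ c = '#' then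
      (PySem.Str.slice path none (some (i : Int)), PySem.Str.slice path (some (i : Int)) none)
    else pvAltGo path rs (i + 1)

def split_query_and_fragment_py_alt (path : String) : String × String :=
  pvAltGo path path.toList 0

-- ===== PRECONDITION & SPEC =====
def Spec_split_query_and_fragment_py (path : String) (out : String × String) : Prop := out = split_query_and_fragment_py_alt path
instance (path : String) (out : String × String) : Decidable (Spec_split_query_and_fragment_py path out) := by unfold Spec_split_query_and_fragment_py; infer_instance

-- ===== CLAIM (what is proved, stated in full; the proofs are below) =====
def Claim_equal_split_query_and_fragment_py : Prop := ∀ (path : String), Dom_split_query_and_fragment_py path → Spec_split_query_and_fragment_py path (split_query_and_fragment_py path)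

-- ===== LEMMAS AND PROOFS =====

-- Common characterisation: split at the first index whose char is '?' or '#'.
def pvCommon (path : String) : String × String :=
  match path.toList.findIdx? (fun c => c = '?' || c = '#') with
  | none => (path, "")
  | some n => (PySem.Str.slice path none (some (n : Int)), PySem.Str.slice path (some (n : Int)) none)

lemma pv_singleton_prefix (c : Char) (t : List Char) : [c] <+: t ↔ t.head? = some c := by
  cases t with
  | nil => simp
  | cons a t => simp [List.cons_prefix_iff, eq_comm]

lemma pv_find_single (l : List Char) (c : Char) :
    PySem.Chars.find l [c] =
      match l.findIdx? (fun x => x = c) with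
      | none => -1
      | some n => (n : Int) := by
  cases h : l.findIdx? (fun x => x = c) with
  | none =>
    rw [List.findIdx?_eq_none_iff] at h
    rw [PySem.Chars.find_eq_neg_one_iff, List.singleton_infix_iff]
    intro hc
    simpa using h c hc
  | some n =>
    obtain ⟨hn, hpc, hmin⟩ := List.findIdx?_eq_some_iff_getElem.mp h
    have hmem : c ∈ l := by
      have := (decide_eq_true_iff).mp hpc; exact this ▸ List.getElem_mem hn
    have hpos : 0 ≤ PySem.Chars.find l [c] := by
      rw [PySem.Chars.find_nonneg_iff, List.singleton_infix_iff]; exact hmem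
    obtain ⟨hpre, hfmin⟩ := PySem.Chars.find_spec hpos
    set m := (PySem.Chars.find l [c]).toNat with hm
    have hlm : l[m]? = some c := by
      rw [← List.head?_drop]; exact (pv_singleton_prefix c _).mp hpre
    have h1 : ¬ n < m := by
      intro hlt
      exact hfmin n hlt ((pv_singleton_prefix c _).mpr
        (by rw [List.head?_drop, List.getElem?_eq_getElem hn]
            simpa using (decide_eq_true_iff).mp hpc))
    have h2 : ¬ m < n := by
      intro hlt
      have hml : m < l.length := by
        by_contra hge
        rw [List.getElem?_eq_none (by omega)] at hlm; simp at hlm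
      apply hmin m hlt
      simp [List.getElem?_eq_getElem hml] at hlm
      simpa using hlm
    have hmn : m = n := by omega
    show PySem.Chars.find l [c] = (n : Int)
    omega

lemma pv_altGo_spec (rest : List Char) (i : Nat) (path : String)
    (h : rest = path.toList.drop i) :
    pvAltGo path rest i =
      match rest.findIdx? (fun c => c = '?' || c = '#') with
      | none => (path, "")
      | some j => (PySem.Str.slice path none (some ((i + j : Nat) : Int)),
                   PySem.Str.slice path (some ((i + j : Nat) : Int)) none) := by
  induction rest generalizing i with
  | nil => simp [pvAltGo]
  | cons c rs ih =>
    by_cases hc : c = '?' ∨ c = '#'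
    · have hb : (c = '?' || c = '#') = true := by
        rcases hc with h1 | h1 <;> simp [h1]
      simp [pvAltGo, hc, List.findIdx?_cons, hb]
    · have hb : (c = '?' || c = '#') = false := by
        have h1 : c ≠ '?' := fun hh => hc (Or.inl hh)
        have h2 : c ≠ '#' := fun hh => hc (Or.inr hh)
        simp [h1, h2]
      have hrs : rs = path.toList.drop (i + 1) := by
        have := congrArg List.tail h
        simpa [List.tail_drop] using this
      simp only [pvAltGo, if_neg hc, List.findIdx?_cons, hb, Bool.false_eq_true, if_false]
      rw [ih (i + 1) hrs]
      cases hfi : rs.findIdx? (fun c => c = '?' || c = '#') with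
      | none => simp
      | some j =>
        have hij : i + 1 + j = i + (j + 1) := by omega
        simp [hij]

lemma pv_B_eq_common (path : String) : split_query_and_fragment_py_alt path = pvCommon path := by
  unfold split_query_and_fragment_py_alt pvCommon
  rw [pv_altGo_spec path.toList 0 path (by simp)]
  cases h : path.toList.findIdx? (fun c => c = '?' || c = '#') <;> simp

lemma pv_A_eq_common (path : String) : split_query_and_fragment_py path = pvCommon path := by
  unfold split_query_and_fragment_py pvCommon
  simp only [PySem.Str.find_eq]
  have hql : ("?" : String).toList = ['?'] := rfl
  have hfl : ("#" : String).toList = ['#'] := rfl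
  rw [hql, hfl, pv_find_single path.toList '?', pv_find_single path.toList '#']
  cases h1 : path.toList.findIdx? (fun x => x = '?') with
  | none =>
    cases h2 : path.toList.findIdx? (fun x => x = '#') with
    | none =>
      have hnone : path.toList.findIdx? (fun c => c = '?' || c = '#') = none := by
        rw [List.findIdx?_eq_none_iff] at h1 h2 ⊢
        intro x hx
        have := h1 x hx; have := h2 x hx
        simp_all
      simp [hnone]
    | some m =>
      obtain ⟨hm, hpm, hminm⟩ := List.findIdx?_eq_some_iff_getElem.mp h2
      have hsome : path.toList.findIdx? (fun c => c = '?' || c = '#') = some m := by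
        rw [List.findIdx?_eq_some_iff_getElem]
        refine ⟨hm, by simp_all, fun j hj => ?_⟩
        have hq1 := (List.findIdx?_eq_none_iff.mp h1) path.toList[j] (List.getElem_mem _)
        have hf1 := hminm j hj
        simp_all
      have hfilt : List.filter (fun idx => decide (0 ≤ idx)) [(-1 : Int), (m : Nat)] = [((m : Nat) : Int)] := by
        simp [List.filter]
      simp [hsome, hfilt, PySem.List.min?_id_cons]
  | some n =>
    obtain ⟨hn, hpn, hminn⟩ := List.findIdx?_eq_some_iff_getElem.mp h1
    cases h2 : path.toList.findIdx? (fun x => x = '#') with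
    | none =>
      have hsome : path.toList.findIdx? (fun c => c = '?' || c = '#') = some n := by
        rw [List.findIdx?_eq_some_iff_getElem]
        refine ⟨hn, by simp_all, fun j hj => ?_⟩
        have hf1 := (List.findIdx?_eq_none_iff.mp h2) path.toList[j] (List.getElem_mem _)
        have hq1 := hminn j hj
        simp_all
      have hfilt : List.filter (fun idx => decide (0 ≤ idx)) [((n : Nat) : Int), (-1 : Int)] = [((n : Nat) : Int)] := by
        simp [List.filter]
      simp [hsome, hfilt, PySem.List.min?_id_cons]
    | some m =>
      obtain ⟨hm, hpm, hminm⟩ := List.findIdx?_eq_some_iff_getElem.mp h2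
      have hsome : path.toList.findIdx? (fun c => c = '?' || c = '#') = some (min n m) := by
        rw [List.findIdx?_eq_some_iff_getElem]
        refine ⟨by omega, ?_, fun j hj => ?_⟩
        · rcases le_total n m with hle | hle
          · simp only [min_eq_left hle]; simp_all
          · simp only [min_eq_right hle]; simp_all
        · have hq1 := hminn j (by omega)
          have hf1 := hminm j (by omega)
          simp_all
      have hfilt : List.filter (fun idx => decide (0 ≤ idx)) [((n : Nat) : Int), ((m : Nat) : Int)] = [((n : Nat) : Int), ((m : Nat) : Int)] := by
        simp [List.filter]
      have hmin2 : PySem.List.min? [((n : Nat) : Int), ((m : Nat) : Int)] (fun x => x) =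
          some ((min n m : Nat) : Int) := by
        rw [PySem.List.min?_id_cons]
        rcases le_total n m with hle | hle
        · simp [min_eq_left hle, min_eq_left (by exact_mod_cast hle : (n : Int) ≤ (m : Nat))]
        · simp [min_eq_right hle, min_eq_right (by exact_mod_cast hle : (m : Int) ≤ (n : Nat))]
      simp [hsome, hfilt, hmin2]

-- ===== VERDICT (by name: the statement is the Claim_ definition above) =====
theorem split_query_and_fragment_py_spec : Claim_equal_split_query_and_fragment_py := by
  intro path _
  unfold Spec_split_query_and_fragment_py
  rw [pv_A_eq_common, pv_B_eq_common]
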